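-- pv_equiv track=rewrite | github.com/Jasonmellet/Gerald-starter-kit | tools/x_system/patterns.py | _topic_from_text
-- ===== SOURCE A (Python) =====
-- from typing import Any, Dict, List
--
-- TOPIC_MARKERS = {
--     "seo": ["seo", "search traffic", "ranking", "organic"],
--     "ppc": ["ppc", "google ads", "meta ads", "cpc", "roas"],
--     "revops": ["revops", "sales ops", "pipeline", "crm", "forecast"],
--     "sales_systems": ["outbound", "follow-up", "lead gen", "sales process", "prospecting"],
--     "ai_ops": ["ai", "automation", "agent", "workflow"],
--     "agency_performance": ["agency", "client", "retainer", "attribution", "reporting"],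
-- }
--
-- def _topic_from_text(text: str) -> str:
--     body = text.lower()
--     scores: Dict[str, int] = {k: 0 for k in TOPIC_MARKERS.keys()}
--     for topic, markers in TOPIC_MARKERS.items():
--         for m in markers:
--             if m in body:
--                 scores[topic] += 1
--     top = sorted(scores.items(), key=lambda kv: kv[1], reverse=True)
--     return top[0][0] if top and top[0][1] > 0 else "general_growth"
-- ===== SOURCE B (Python) =====
-- TOPIC_MARKERS = {
--     "seo": ["seo", "search traffic", "ranking", "organic"],
--     "ppc": ["ppc", "google ads", "meta ads", "cpc", "roas"],
--     "revops": ["revops", "sales ops", "pipeline", "crm", "forecast"],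
--     "sales_systems": ["outbound", "follow-up", "lead gen", "sales process", "prospecting"],
--     "ai_ops": ["ai", "automation", "agent", "workflow"],
--     "agency_performance": ["agency", "client", "retainer", "attribution", "reporting"],
-- }
--
-- def _topic_from_text(text: str) -> str:
--     body = text.lower()
--     best_topic, best_score = "general_growth", 0
--     for topic, markers in TOPIC_MARKERS.items():
--         score = sum(1 for m in markers if m in body)
--         if score > best_score:
--             best_topic, best_score = topic, score
--     return best_topic
-- ===== Notes on version B (the rewrite author's own statement) =====
-- stated objective: simpler
-- what changed: Replaces the scores dict plus full stable sort of all topics with a single pass over TOPIC_MARKERS that tracks the best (topic, score) so far, counting each topic's markers with a generator sum; a strict comparison reproduces the stable sort's first-topic tie-breaking and the all-zero case falls through to the default topic.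
import Mathlib
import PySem

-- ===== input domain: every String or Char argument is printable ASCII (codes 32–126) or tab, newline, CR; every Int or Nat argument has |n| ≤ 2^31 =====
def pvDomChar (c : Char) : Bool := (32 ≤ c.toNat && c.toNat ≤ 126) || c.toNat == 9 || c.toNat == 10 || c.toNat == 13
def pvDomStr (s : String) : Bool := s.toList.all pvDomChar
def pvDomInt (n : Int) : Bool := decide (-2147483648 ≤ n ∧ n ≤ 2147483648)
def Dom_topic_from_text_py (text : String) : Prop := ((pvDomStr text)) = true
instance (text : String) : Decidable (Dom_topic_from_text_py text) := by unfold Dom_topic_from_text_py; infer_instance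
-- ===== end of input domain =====

-- B replaces A's scores dict + full stable sort with a single pass tracking the best (topic, score); objective: simpler.

def TOPIC_MARKERS : List (String × List String) :=
  [("seo", ["seo", "search traffic", "ranking", "organic"]),
   ("ppc", ["ppc", "google ads", "meta ads", "cpc", "roas"]),
   ("revops", ["revops", "sales ops", "pipeline", "crm", "forecast"]),
   ("sales_systems", ["outbound", "follow-up", "lead gen", "sales process", "prospecting"]),
   ("ai_ops", ["ai", "automation", "agent", "workflow"]),
   ("agency_performance", ["agency", "client", "retainer", "attribution", "reporting"])]

-- ===== PORT A =====
def topic_from_text_py (text : String) : String :=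
  let body := PySem.Str.lower text
  -- scores = {k: 0 for k in TOPIC_MARKERS.keys()}
  let scores0 : PySem.Dict String Int :=
    (TOPIC_MARKERS.map (fun kv => kv.1)).foldl (fun d k => d.insert k 0) PySem.Dict.empty
  -- for topic, markers in TOPIC_MARKERS.items(): for m in markers: if m in body: scores[topic] += 1
  -- (modify with default 0 = Python's read-then-write; the key is always present here)
  let scores := TOPIC_MARKERS.foldl
    (fun sc kv => kv.2.foldl
        (fun sc m => if PySem.Str.isIn m body then sc.modify kv.1 0 (· + 1) else sc) sc)
    scores0
  -- top = sorted(scores.items(), key=lambda kv: kv[1], reverse=True)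
  let top := PySem.List.sorted scores.items (fun kv => kv.2) true
  -- return top[0][0] if top and top[0][1] > 0 else "general_growth"
  match top with
  | (k, v) :: _ => if v > 0 then k else "general_growth"
  | [] => "general_growth"

-- ===== PORT B =====
def topic_from_text_py_alt (text : String) : String :=
  let body := PySem.Str.lower text
  (TOPIC_MARKERS.foldl
    (fun (st : String × Int) kv =>
      let score : Int := (kv.2.countP (fun m => PySem.Str.isIn m body) : Int)
      if score > st.2 then (kv.1, score) else st)
    ("general_growth", 0)).1

-- ===== PRECONDITION & SPEC =====
def Spec_topic_from_text_py (text : String) (out : String) : Prop := out = topic_from_text_py_alt text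
instance (text : String) (out : String) : Decidable (Spec_topic_from_text_py text out) := by unfold Spec_topic_from_text_py; infer_instance

-- ===== CLAIM (what is proved, stated in full; the proofs are below) =====
def Claim_equal_topic_from_text_py : Prop := ∀ (text : String), Dom_topic_from_text_py text → Spec_topic_from_text_py text (topic_from_text_py text)

-- ===== LEMMAS AND PROOFS =====

-- first element of xs whose key is strictly greater than every earlier key ("first maximum")
def pvArgmaxFirst (xs : List (String × Int)) : Option (String × Int) :=
  match xs with
  | [] => none
  | h :: t => some (t.foldl (fun b y => if y.2 > b.2 then y else b) h)

theorem pvArgmaxFirst_append (xs : List (String × Int)) (x : String × Int) :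
    pvArgmaxFirst (xs ++ [x]) =
      some (match pvArgmaxFirst xs with
            | none => x
            | some m => if x.2 > m.2 then x else m) := by
  cases xs with
  | nil => simp [pvArgmaxFirst]
  | cons h t => simp [pvArgmaxFirst, List.foldl_append]

theorem pvHead_insertBy (before : (String × Int) → (String × Int) → Bool) (x : String × Int)
    (l : List (String × Int)) :
    (PySem.List.insertBy before x l).head? =
      some (match l.head? with
            | none => x
            | some y => if before x y then x else y) := by
  cases l with
  | nil => simp [PySem.List.insertBy]
  | cons y ys =>
    by_cases h : before x y = true <;> simp [PySem.List.insertBy, h]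

theorem pvHead_sorted_rev (xs : List (String × Int)) :
    (PySem.List.sorted xs (fun kv => kv.2) true).head? = pvArgmaxFirst xs := by
  induction xs using List.reverseRecOn with
  | nil => simp [PySem.List.sorted, pvArgmaxFirst]
  | append_singleton xs x ih =>
    rw [pvArgmaxFirst_append]
    simp only [PySem.List.sorted, List.foldl_append, List.foldl_cons, List.foldl_nil]
    rw [pvHead_insertBy]
    simp only [PySem.List.sorted] at ih
    rw [ih]
    cases hxs : pvArgmaxFirst xs with
    | none => simp
    | some m =>
      simp only [Option.some.injEq]
      by_cases h : m.2 < x.2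
      · simp [h]
      · simp [h]

theorem pvFold_best (xs : List (String × Int)) (s0 : String × Int) :
    xs.foldl (fun st kv => if kv.2 > st.2 then kv else st) s0 =
      (match pvArgmaxFirst xs with
       | none => s0
       | some m => if m.2 > s0.2 then m else s0) := by
  induction xs using List.reverseRecOn with
  | nil => simp [pvArgmaxFirst]
  | append_singleton xs x ih =>
    rw [pvArgmaxFirst_append, List.foldl_append, List.foldl_cons, List.foldl_nil, ih]
    cases hxs : pvArgmaxFirst xs with
    | none => simp
    | some m =>
      simp only
      by_cases h1 : x.2 > m.2 <;> by_cases h2 : m.2 > s0.2 <;>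
        simp [h1, h2] <;> try (intro h; exfalso; omega)

-- the dict A's double loop builds, as one named term (used only by the proofs)
def pvD (text : String) : PySem.Dict String Int :=
  (List.foldl (fun d x => d.modify x 0 (· + 1))
      (List.foldl (fun d x => d.modify x 0 (· + 1))
      (List.foldl (fun d x => d.modify x 0 (· + 1))
      (List.foldl (fun d x => d.modify x 0 (· + 1))
      (List.foldl (fun d x => d.modify x 0 (· + 1))
      (List.foldl (fun d x => d.modify x 0 (· + 1))
      ((((((PySem.Dict.empty.insert "seo" 0).insert "ppc" 0).insert "revops" 0).insert "sales_systems" 0).insert "ai_ops" 0).insert "agency_performance" 0)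
      (List.map (fun _ => "seo") (List.filter (fun m => PySem.Str.isIn m (PySem.Str.lower text)) ["seo", "search traffic", "ranking", "organic"])))
      (List.map (fun _ => "ppc") (List.filter (fun m => PySem.Str.isIn m (PySem.Str.lower text)) ["ppc", "google ads", "meta ads", "cpc", "roas"])))
      (List.map (fun _ => "revops") (List.filter (fun m => PySem.Str.isIn m (PySem.Str.lower text)) ["revops", "sales ops", "pipeline", "crm", "forecast"])))
      (List.map (fun _ => "sales_systems") (List.filter (fun m => PySem.Str.isIn m (PySem.Str.lower text)) ["outbound", "follow-up", "lead gen", "sales process", "prospecting"])))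
      (List.map (fun _ => "ai_ops") (List.filter (fun m => PySem.Str.isIn m (PySem.Str.lower text)) ["ai", "automation", "agent", "workflow"])))
      (List.map (fun _ => "agency_performance") (List.filter (fun m => PySem.Str.isIn m (PySem.Str.lower text)) ["agency", "client", "retainer", "attribution", "reporting"])))

-- conditional per-marker increments = counting fold over the repeated key
theorem pvCondFold (p : String → Bool) (k : String) (ms : List String)
    (sc : PySem.Dict String Int) :
    ms.foldl (fun sc m => if p m then sc.modify k 0 (· + 1) else sc) sc
      = ((ms.filter p).map (fun _ => k)).foldl (fun d x => d.modify x 0 (· + 1)) sc := by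
  induction ms generalizing sc with
  | nil => rfl
  | cons m t ih =>
    by_cases h : p m = true <;> simp [h, ih]

theorem pvUpdate_replicate (s : PySem.Set String) (k : String) (h : k ∈ s) (n : Nat) :
    PySem.Set.update s (List.replicate n k) = s := by
  rw [PySem.Set.update_eq_append_filter]
  have hnil : List.filter (fun y => !PySem.Set.contains s y) (PySem.Set.ofList (List.replicate n k)) = [] := by
    rw [List.filter_eq_nil_iff]
    intro y hy
    have hyk : y = k := by
      have h1 := (PySem.Set.mem_ofList (List.replicate n k) y).1 hy
      exact List.eq_of_mem_replicate h1
    subst hyk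
    simpa using h
  rw [hnil, List.append_nil]

theorem pvD_keys (text : String) : (pvD text).keys = ["seo", "ppc", "revops", "sales_systems", "ai_ops", "agency_performance"] := by
  have hb : ((((((PySem.Dict.empty.insert "seo" (0:Int)).insert "ppc" 0).insert "revops" 0).insert
      "sales_systems" 0).insert "ai_ops" 0).insert "agency_performance" 0).keys
      = ["seo", "ppc", "revops", "sales_systems", "ai_ops", "agency_performance"] := by decide
  unfold pvD
  simp [PySem.Dict.keys_foldl_modify, hb, pvUpdate_replicate]

-- the dict after A's double loop: same keys, each key's marker count
theorem pvItems_after (text : String) :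
    (TOPIC_MARKERS.foldl
      (fun sc kv => kv.2.foldl
          (fun sc m => if PySem.Str.isIn m (PySem.Str.lower text) then sc.modify kv.1 0 (· + 1) else sc) sc)
      ((TOPIC_MARKERS.map (fun kv => kv.1)).foldl (fun d k => d.insert k 0) PySem.Dict.empty)).items
    = TOPIC_MARKERS.map
        (fun kv => (kv.1, ((kv.2.countP (fun m => PySem.Str.isIn m (PySem.Str.lower text))) : Int))) := by
  simp only [pvCondFold]
  simp only [TOPIC_MARKERS, List.foldl_cons, List.foldl_nil, List.map_cons, List.map_nil]
  show (pvD text).items = _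
  rw [PySem.Dict.items_eq_map_keys (pvD text) (by rw [pvD_keys]; decide) 0, pvD_keys]
  unfold pvD
  simp [PySem.Dict.getD_foldl_modify_add_one, List.count_replicate, PySem.Dict.getD_insert,
    PySem.Dict.getD_empty, ← List.countP_eq_length_filter]

theorem topic_from_text_py_eq (text : String) :
    topic_from_text_py text = topic_from_text_py_alt text := by
  simp only [topic_from_text_py, topic_from_text_py_alt]
  rw [pvItems_after text]
  rw [show (List.foldl
        (fun (st : String × Int) kv =>
          if ((List.countP (fun m => PySem.Str.isIn m (PySem.Str.lower text)) kv.2 : Nat) : Int) > st.2 then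
            (kv.1, ((List.countP (fun m => PySem.Str.isIn m (PySem.Str.lower text)) kv.2 : Nat) : Int))
          else st)
        ("general_growth", 0) TOPIC_MARKERS)
      = List.foldl (fun (st : String × Int) kv => if kv.2 > st.2 then kv else st) ("general_growth", (0:Int))
          (List.map (fun kv => (kv.1, ((List.countP (fun m => PySem.Str.isIn m (PySem.Str.lower text)) kv.2 : Nat) : Int))) TOPIC_MARKERS)
    from by rw [List.foldl_map]]
  rw [pvFold_best]
  have hh := pvHead_sorted_rev
    (List.map (fun kv => (kv.1, ((List.countP (fun m => PySem.Str.isIn m (PySem.Str.lower text)) kv.2 : Nat) : Int))) TOPIC_MARKERS)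
  cases hs : PySem.List.sorted
      (List.map (fun kv => (kv.1, ((List.countP (fun m => PySem.Str.isIn m (PySem.Str.lower text)) kv.2 : Nat) : Int))) TOPIC_MARKERS)
      (fun kv => kv.2) true with
  | nil =>
    rw [hs] at hh
    rw [← hh]
    simp
  | cons m t =>
    rw [hs] at hh
    rw [← hh]
    obtain ⟨k, v⟩ := m
    by_cases hv : v > 0 <;> simp [hv]

-- ===== VERDICT (by name: the statement is the Claim_ definition above) =====
theorem topic_from_text_py_spec : Claim_equal_topic_from_text_py := by
  intro text _
  unfold Spec_topic_from_text_py
  exact topic_from_text_py_eq text
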